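-- pv_equiv track=rewrite | github.com/Gogi32211/sachoki | backend/signal_event_extractor.py | _previous_tz_sequence
-- ===== SOURCE A (Python) =====
-- def _bar_active_tz(bar: dict) -> str:
--     tz = str(bar.get("tz") or "")
--     if tz.startswith(("T", "Z")):
--         return tz
--     return ""
--
-- def _previous_tz_sequence(bars: list[dict], scan_idx: int, n: int) -> list[str]:
--     """Return last n T/Z signals ending at scan_idx (oldest first).
--     Pads with '' if fewer than n bars have a T/Z signal in the lookback window."""
--     out: list[str] = []
--     j = scan_idx
--     while j >= 0 and len(out) < n:
--         s = _bar_active_tz(bars[j])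
--         if s:
--             out.append(s)
--         j -= 1
--     out.reverse()
--     while len(out) < n:
--         out.insert(0, "")
--     return out
-- ===== SOURCE B (Python) =====
-- def _bar_active_tz(bar: dict) -> str:
--     tz = str(bar.get("tz") or "")
--     if tz.startswith(("T", "Z")):
--         return tz
--     return ""
--
-- def _previous_tz_sequence(bars: list[dict], scan_idx: int, n: int) -> list[str]:
--     """Forward pass: collect all active T/Z signals up to scan_idx, keep the last n,
--     front-pad with '' to length n."""
--     if n <= 0:
--         return []
--     sig: list[str] = []
--     for j in range(scan_idx + 1):
--         s = _bar_active_tz(bars[j])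
--         if s:
--             sig.append(s)
--     tail = sig[-n:]
--     return [""] * (n - len(tail)) + tail
-- ===== Notes on version B (the rewrite author's own statement) =====
-- stated objective: alternative
-- what changed: Replaces A's backward early-stopping while-loop with reverse-and-front-insert padding by a forward index scan that collects all active signals in chronological order, then takes the last n with a negative slice and pads with list arithmetic.
import Mathlib
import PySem

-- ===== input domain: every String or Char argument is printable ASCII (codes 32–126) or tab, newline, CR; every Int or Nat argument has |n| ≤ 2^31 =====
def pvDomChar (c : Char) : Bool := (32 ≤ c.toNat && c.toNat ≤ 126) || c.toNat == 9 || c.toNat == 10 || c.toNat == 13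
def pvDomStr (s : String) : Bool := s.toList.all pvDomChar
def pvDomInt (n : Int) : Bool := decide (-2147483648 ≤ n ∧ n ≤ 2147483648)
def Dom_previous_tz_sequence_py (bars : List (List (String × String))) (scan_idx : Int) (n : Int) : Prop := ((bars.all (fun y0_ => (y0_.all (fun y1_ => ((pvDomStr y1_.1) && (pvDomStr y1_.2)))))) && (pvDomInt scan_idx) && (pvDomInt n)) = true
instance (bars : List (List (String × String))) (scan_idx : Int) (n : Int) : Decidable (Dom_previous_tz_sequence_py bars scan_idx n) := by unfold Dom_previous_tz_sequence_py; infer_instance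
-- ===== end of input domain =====

-- ===== PORT A =====
-- B replaces A's backward early-stopping scan + reverse + front-insert padding by a
-- forward collect-all pass, a negative slice for the last n, and arithmetic padding.

-- helper _bar_active_tz, shared verbatim by both Python versions
def barActiveTz (bar : List (String × String)) : String :=
  let tz := ((bar.lookup "tz").getD "")      -- bar.get("tz") or ""  (None and "" both give "")
  if PySem.Str.startswith tz "T" || PySem.Str.startswith tz "Z" then tz else ""

-- the 'while j >= 0 and len(out) < n' loop of A
def aLoop (bars : List (List (String × String))) (n : Int) (j : Int) (out : List String) : List String :=
  if _h : 0 ≤ j ∧ (out.length : Int) < n then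
    match PySem.List.pyGet? bars j with
    | none => out            -- Python raises IndexError here (excluded by Pre_)
    | some bar =>
      let s := barActiveTz bar
      aLoop bars n (j - 1) (if s ≠ "" then out ++ [s] else out)
  else out
termination_by (j + 1).toNat
decreasing_by omega

-- the 'while len(out) < n: out.insert(0, "")' padding loop of A
def padLoop (n : Int) (out : List String) : List String :=
  if (out.length : Int) < n then padLoop n ("" :: out) else out
termination_by (n - out.length).toNat
decreasing_by simp_all; omega

def previous_tz_sequence_py (bars : List (List (String × String))) (scan_idx : Int) (n : Int) : List String :=
  padLoop n (aLoop bars n scan_idx []).reverse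

-- ===== PORT B =====
def previous_tz_sequence_py_alt (bars : List (List (String × String))) (scan_idx : Int) (n : Int) : List String :=
  if n ≤ 0 then []
  else
    let sig := (PySem.List.pyRange 0 (scan_idx + 1) 1).foldl
      (fun acc j =>
        match PySem.List.pyGet? bars j with
        | none => acc        -- Python raises IndexError here (excluded by Pre_)
        | some bar =>
          let s := barActiveTz bar
          if s ≠ "" then acc ++ [s] else acc) []
    let tail := PySem.List.slice sig (some (-n)) none
    List.replicate (n - tail.length).toNat "" ++ tail

-- ===== PRECONDITION & SPEC =====
-- Pre_ excludes exactly the inputs on which A raises IndexError: n > 0 with scan_idx past the end of bars.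
def Pre_previous_tz_sequence_py (bars : List (List (String × String))) (scan_idx : Int) (n : Int) : Prop :=
  0 < n → scan_idx < (bars.length : Int)
instance (bars : List (List (String × String))) (scan_idx : Int) (n : Int) : Decidable (Pre_previous_tz_sequence_py bars scan_idx n) := by unfold Pre_previous_tz_sequence_py; infer_instance

def pvWitness_previous_tz_sequence_py : (List (List (String × String))) × Int × Int :=
  ([[("tz", "T1")], [("tz", "x")], [("tz", "Z2")]], 2, 3)

def Spec_previous_tz_sequence_py (bars : List (List (String × String))) (scan_idx : Int) (n : Int) (out : List String) : Prop := out = previous_tz_sequence_py_alt bars scan_idx n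
instance (bars : List (List (String × String))) (scan_idx : Int) (n : Int) (out : List String) : Decidable (Spec_previous_tz_sequence_py bars scan_idx n out) := by unfold Spec_previous_tz_sequence_py; infer_instance

-- ===== CLAIM (what is proved, stated in full; the proofs are below) =====
def Claim_equal_previous_tz_sequence_py : Prop := ∀ (bars : List (List (String × String))) (scan_idx : Int) (n : Int), Dom_previous_tz_sequence_py bars scan_idx n → Pre_previous_tz_sequence_py bars scan_idx n → Spec_previous_tz_sequence_py bars scan_idx n (previous_tz_sequence_py bars scan_idx n)

-- ===== LEMMAS AND PROOFS =====

-- chronological list of non-empty signals of a prefix of bars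
def actsOf (l : List (List (String × String))) : List String :=
  (l.map barActiveTz).filter (· ≠ "")

lemma actsOf_append_singleton (l : List (List (String × String))) (b : List (String × String)) :
    actsOf (l ++ [b]) = actsOf l ++ (if barActiveTz b ≠ "" then [barActiveTz b] else []) := by
  simp [actsOf, List.filter_append]
  split_ifs with h <;> simp [h]

-- A's scan loop, characterised: it returns out extended with the reversed tail of the actives
lemma aLoop_eq (bars : List (List (String × String))) (n : Int) :
    ∀ (k : Nat) (j : Int), (j + 1).toNat = k → j < (bars.length : Int) → ∀ out : List String,
      aLoop bars n j out =
        out ++ ((actsOf (bars.take (j + 1).toNat)).reverse.take (n - out.length).toNat) := by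
  intro k
  induction k with
  | zero =>
    intro j hk _ out
    rw [aLoop]
    simp [hk, show ¬ (0 ≤ j ∧ (out.length : Int) < n) by omega, actsOf]
  | succ k ih =>
    intro j hk hlen out
    have hj0 : 0 ≤ j := by omega
    have hjlt : j.toNat < bars.length := by omega
    have htake : bars.take (j + 1).toNat = bars.take j.toNat ++ [bars[j.toNat]] := by
      have : (j + 1).toNat = j.toNat + 1 := by omega
      rw [this, List.take_add_one, List.getElem?_eq_getElem hjlt]
      simp
    rw [aLoop]
    by_cases hout : (out.length : Int) < n
    · rw [dif_pos ⟨hj0, hout⟩]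
      rw [PySem.List.pyGet?_eq_some_getElem bars hj0 (by omega)]
      show aLoop bars n (j - 1)
          (if barActiveTz bars[j.toNat] ≠ "" then out ++ [barActiveTz bars[j.toNat]] else out) = _
      have ihj := ih (j - 1) (by omega) (by omega)
      have h1 : (j - 1 + 1).toNat = j.toNat := by omega
      rw [htake, actsOf_append_singleton, List.reverse_append]
      by_cases hs : barActiveTz bars[j.toNat] = ""
      · rw [if_neg (not_not_intro hs), ihj out, h1]
        simp [hs]
      · rw [if_pos hs, ihj (out ++ [barActiveTz bars[j.toNat]]), h1]
        have h2 : (n - ((out ++ [barActiveTz bars[j.toNat]]).length : Int)).toNat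
            = (n - out.length).toNat - 1 := by simp; omega
        have h3 : (n - (out.length : Int)).toNat = ((n - out.length).toNat - 1) + 1 := by omega
        rw [h2, h3]
        simp [hs, List.take_succ_cons]
    · rw [dif_neg (by omega : ¬ (0 ≤ j ∧ (out.length : Int) < n))]
      simp [show (n - (out.length : Int)).toNat = 0 by omega]

-- A's padding loop is front-padding with replicate
lemma padLoop_eq (n : Int) : ∀ (k : Nat) (out : List String), (n - out.length).toNat = k →
    padLoop n out = List.replicate (n - out.length).toNat "" ++ out := by
  intro k
  induction k with
  | zero =>
    intro out hk
    rw [padLoop]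
    simp [show ¬ ((out.length : Int) < n) by omega, hk]
  | succ k ih =>
    intro out hk
    rw [padLoop]
    have h1 : (out.length : Int) < n := by omega
    rw [if_pos h1, ih ("" :: out) (by simp; omega)]
    have h2 : (n - (("" :: out).length : Int)).toNat = k := by simp; omega
    rw [h2, hk, List.replicate_succ']
    simp

-- B's forward fold collects exactly the actives of the prefix
lemma bFold_eq (bars : List (List (String × String))) :
    ∀ (m : Nat), m ≤ bars.length → ∀ acc : List String,
      (PySem.List.pyRange 0 (m : Int) 1).foldl
        (fun acc j =>
          match PySem.List.pyGet? bars j with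
          | none => acc
          | some bar =>
            let s := barActiveTz bar
            if s ≠ "" then acc ++ [s] else acc) acc
      = acc ++ actsOf (bars.take m) := by
  intro m
  induction m with
  | zero => intro _ acc; simp [PySem.List.pyRange, actsOf]
  | succ m ih =>
    intro hm acc
    have hr : PySem.List.pyRange 0 ((m : Int) + 1) 1
        = PySem.List.pyRange 0 (m : Int) 1 ++ [(m : Int)] := by
      simpa using PySem.List.pyRange_one_succ_right (a := 0) (b := (m : Int)) (by omega)
    push_cast
    rw [hr, List.foldl_append, ih (by omega) acc]
    simp only [List.foldl_cons, List.foldl_nil]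
    rw [PySem.List.pyGet?_eq_some_getElem bars (by omega) (by push_cast; omega)]
    have htake : bars.take (m + 1) = bars.take m ++ [bars[m]] := by
      rw [List.take_add_one, List.getElem?_eq_getElem (by omega)]; simp
    have hm' : (m : Int).toNat = m := by omega
    rw [htake, actsOf_append_singleton]
    simp only [hm']
    split_ifs <;> simp_all <;> first | rfl | contradiction

-- last-n of a list = reverse of the first-n of its reverse
lemma reverse_take_reverse (l : List String) (k : Nat) :
    (l.reverse.take k).reverse = l.drop (l.length - k) := by
  rw [List.take_reverse]; simp

-- pyRange is empty for a nonpositive bound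
lemma pyRange_nonpos (b : Int) (hb : b ≤ 0) : PySem.List.pyRange 0 b 1 = [] := by
  simp [PySem.List.pyRange]
  omega

theorem previous_tz_sequence_py_spec_aux :
    ∀ (bars : List (List (String × String))) (scan_idx : Int) (n : Int),
      Pre_previous_tz_sequence_py bars scan_idx n →
      previous_tz_sequence_py bars scan_idx n = previous_tz_sequence_py_alt bars scan_idx n := by
  intro bars scan_idx n hpre
  unfold previous_tz_sequence_py previous_tz_sequence_py_alt
  by_cases hn : n ≤ 0
  · -- both sides: A's loops do nothing, B returns [] directly
    simp only [hn, if_true]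
    rw [aLoop, dif_neg (by simp; omega : ¬ (0 ≤ scan_idx ∧ ((([] : List String).length : Int) < n)))]
    rw [padLoop, if_neg (by simp; omega : ¬ (((([] : List String).reverse.length : Int)) < n))]
    simp
  · simp only [hn, if_false]
    have hn0 : 0 < n := by omega
    have hsl : scan_idx < (bars.length : Int) := hpre hn0
    have hslice : ∀ l : List String,
        PySem.List.slice l (some (-n)) none = l.drop (l.length - n.toNat) := by
      intro l
      rw [show -n = -((n.toNat : Nat) : Int) by omega,
        PySem.List.slice_from_neg_natCast l n.toNat (by omega)]
    by_cases hs : scan_idx < 0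
    · -- negative scan index: nothing is collected, both pad to n blanks
      rw [aLoop, dif_neg (by omega), List.reverse_nil]
      rw [padLoop_eq n (n - (([] : List String).length : Int)).toNat [] rfl]
      rw [pyRange_nonpos (scan_idx + 1) (by omega)]
      simp only [List.foldl_nil, hslice]
      simp
    · -- main case: 0 ≤ scan_idx < len bars
      have h0 : 0 ≤ scan_idx := by omega
      rw [aLoop_eq bars n (scan_idx + 1).toNat scan_idx rfl hsl []]
      simp only [List.nil_append, List.length_nil, Nat.cast_zero, Int.sub_zero]
      rw [reverse_take_reverse]
      have hb : ((scan_idx + 1).toNat : Int) = scan_idx + 1 := by omega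
      rw [← hb, bFold_eq bars (scan_idx + 1).toNat (by omega) []]
      simp only [List.nil_append, hslice]
      rw [padLoop_eq n _ _ rfl]
      have hmax : max (scan_idx + 1) 0 = scan_idx + 1 := by omega
      simp [hmax]

-- ===== VERDICT (by name: the statement is the Claim_ definition above) =====
theorem previous_tz_sequence_py_spec : Claim_equal_previous_tz_sequence_py := by
  intro bars scan_idx n _ hpre
  unfold Spec_previous_tz_sequence_py
  exact previous_tz_sequence_py_spec_aux bars scan_idx n hpre
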